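-- pv_equiv track=rewrite | github.com/jimon/adventofcode2018 | day08/2.py | read_node
-- ===== SOURCE A (Python) =====
-- def read_node(data, index):
-- 	sums = 0
--
-- 	if index >= len(data):
-- 		return (index, sums)
--
-- 	len_children = data[index + 0]
-- 	len_metadata = data[index + 1]
-- 	index += 2
--
-- 	children_sums = []
-- 	for i in range(0, len_children):
-- 		children_sums.append(read_node(data, index))
-- 		index = children_sums[-1][0]
--
-- 	if len(children_sums) > 0:
-- 		for i in range(0, len_metadata):
-- 			metadata_index = data[index] - 1
-- 			if metadata_index >= 0 and metadata_index < len(children_sums):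
-- 				sums += children_sums[metadata_index][1]
-- 			index += 1
-- 	else:
-- 		for i in range(0, len_metadata):
-- 			sums += data[index]
-- 			index += 1
--
-- 	return (index, sums)
-- ===== SOURCE B (Python) =====
-- def read_node(data, index):
--     tree, end = _parse(data, index)
--     return (end, _value(tree))
--
-- def _parse(data, i):
--     if i >= len(data):
--         return (([], []), i)
--     num_children, num_meta = data[i], data[i + 1]
--     i += 2
--     children = []
--     for _ in range(num_children):
--         child, i = _parse(data, i)
--         children.append(child)
--     meta = data[i:i + num_meta] if num_meta > 0 else []
--     return ((children, meta), i + len(meta))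
--
-- def _value(node):
--     children, meta = node
--     if not children:
--         return sum(meta)
--     vals = [_value(c) for c in children]
--     return sum(vals[x - 1] for x in meta if 1 <= x <= len(vals))
-- ===== Notes on version B (the rewrite author's own statement) =====
-- stated objective: alternative
-- what changed: A fuses parsing and evaluation in one recursive pass with index threading and accumulator loops; B decomposes the task into two phases: parse the serialization into an explicit tree, then evaluate the tree (sum of metadata at leaves, metadata-indexed child values at inner nodes).
-- outside the precondition, e.g. on read_node([0, 1, 5], -3): A returns (0, 5), B returns (-1, 0); on read_node([1, 0], 0): A returns (2, 0), B returns (2, 0)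
import Mathlib
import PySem

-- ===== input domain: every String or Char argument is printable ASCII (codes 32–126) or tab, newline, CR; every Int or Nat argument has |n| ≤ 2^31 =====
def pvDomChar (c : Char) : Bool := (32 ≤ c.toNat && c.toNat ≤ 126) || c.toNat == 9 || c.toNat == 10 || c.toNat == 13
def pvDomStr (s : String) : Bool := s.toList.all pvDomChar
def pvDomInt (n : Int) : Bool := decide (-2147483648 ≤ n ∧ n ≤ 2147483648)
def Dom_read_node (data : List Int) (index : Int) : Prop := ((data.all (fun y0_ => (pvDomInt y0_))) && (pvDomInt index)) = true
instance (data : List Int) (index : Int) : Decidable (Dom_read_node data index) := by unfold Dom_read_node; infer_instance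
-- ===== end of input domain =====

-- B replaces A's fused recursive accumulation by a two-phase decomposition: parse the
-- serialization into an explicit tree, then evaluate the tree (objective: alternative).

-- ===== PORT A =====
-- A's metadata loop over children references: sums += children_sums[data[index]-1][1] when in range.
-- The pyGetD defaults stand for IndexError (excluded by Pre_read_node).
def metaRefA (data : List Int) (cs : List (Int × Int)) : Nat → Int → Int → Int × Int
  | 0, index, sums => (index, sums)
  | k+1, index, sums =>
    let mi := PySem.List.pyGetD data index 0 - 1
    let sums' := if 0 ≤ mi ∧ mi < (cs.length : Int) then sums + (PySem.List.pyGetD cs mi (0, 0)).2 else sums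
    metaRefA data cs k (index + 1) sums'

-- A's raw metadata loop: sums += data[index].
def metaRawA (data : List Int) : Nat → Int → Int → Int × Int
  | 0, index, sums => (index, sums)
  | k+1, index, sums => metaRawA data k (index + 1) (sums + PySem.List.pyGetD data index 0)

-- A's recursion, fuel-guarded (fuel data.length + 1 is enough on every input Pre_ admits);
-- readKidsF is the children-collecting for-loop with its accumulator list (the recursive call is its parameter).
def readKidsF (f : Int → Int × Int) : Nat → Int → List (Int × Int) → List (Int × Int) × Int
  | 0, index, acc => (acc, index)
  | k+1, index, acc =>
    let r := f index
    readKidsF f k r.1 (acc ++ [r])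

def readA (data : List Int) : Nat → Int → Int × Int
  | 0, index => (index, 0)
  | fuel+1, index =>
    if (data.length : Int) ≤ index then (index, 0)
    else
      match PySem.List.pyGet? data index, PySem.List.pyGet? data (index + 1) with
      | some lenC, some lenM =>
        let r := readKidsF (readA data fuel) lenC.toNat (index + 2) []
        if 0 < r.1.length then metaRefA data r.1 lenM.toNat r.2 0
        else metaRawA data lenM.toNat r.2 0
      | _, _ => (index, 0)  -- data[index]/data[index+1] raises IndexError in Python: excluded by Pre_read_node

def read_node (data : List Int) (index : Int) : Int × Int :=
  readA data (data.length + 1) index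

-- ===== PORT B =====
-- explicit tree built by Source B's _parse (mutual pair instead of a nested inductive)
mutual
inductive PTree : Type
  | mk : PTreeList → List Int → PTree
inductive PTreeList : Type
  | nil : PTreeList
  | cons : PTree → PTreeList → PTreeList
end

-- Source B's _parse, fuel-guarded exactly like readA
def parseKidsF (f : Int → PTree × Int) : Nat → Int → PTreeList × Int
  | 0, i => (.nil, i)
  | k+1, i =>
    let c := f i
    let r := parseKidsF f k c.2
    (.cons c.1 r.1, r.2)

def parseB (data : List Int) : Nat → Int → PTree × Int
  | 0, i => (PTree.mk .nil [], i)
  | fuel+1, i =>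
    if (data.length : Int) ≤ i then (PTree.mk .nil [], i)
    else
      match PySem.List.pyGet? data i, PySem.List.pyGet? data (i + 1) with
      | some c, some m =>
        let r := parseKidsF (parseB data fuel) c.toNat (i + 2)
        let md := if 0 < m then PySem.List.slice data (some r.2) (some (r.2 + m)) else []
        (PTree.mk r.1 md, r.2 + md.length)
      | _, _ => (PTree.mk .nil [], i)  -- data[i]/data[i+1] raises IndexError in Python: excluded by Pre_read_node

-- Source B's _value: child values computed once, then summed by metadata reference
mutual
def valueB : PTree → Int
  | .mk .nil md => md.foldl (· + ·) 0
  | .mk (.cons t ts) md =>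
    let vals := valsB (.cons t ts)
    md.foldl (fun s x => if 1 ≤ x ∧ x ≤ (vals.length : Int) then s + PySem.List.pyGetD vals (x - 1) 0 else s) 0
def valsB : PTreeList → List Int
  | .nil => []
  | .cons t ts => valueB t :: valsB ts
end

def read_node_alt (data : List Int) (index : Int) : Int × Int :=
  let r := parseB data (data.length + 1) index
  (r.2, valueB r.1)

-- ===== PRECONDITION & SPEC =====
-- Grammar validator for the serialization format: a node at a non-negative position i has its
-- two-entry header in range, max(c,0) fully present children, and max(m,0) metadata entries in
-- range; it returns the end position.  (Counts are clamped exactly like Python's range().)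
def chkKidsF (f : Int → Option Int) : Nat → Int → Option Int
  | 0, i => some i
  | k+1, i => (f i).bind (chkKidsF f k)

def chkNode (data : List Int) : Nat → Int → Option Int
  | 0, _ => none
  | fuel+1, i =>
    if 0 ≤ i ∧ i + 1 < (data.length : Int) then
      match chkKidsF (chkNode data fuel) (PySem.List.pyGetD data i 0).toNat (i + 2) with
      | some j =>
        if j + ((PySem.List.pyGetD data (i + 1) 0).toNat : Int) ≤ (data.length : Int) then
          some (j + ((PySem.List.pyGetD data (i + 1) 0).toNat : Int))
        else none
      | none => none
    else none

-- Pre_ excludes (a) inputs on which A raises IndexError (truncated headers or metadata),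
-- (b) negative start indices, where A's reads wrap around via Python negative indexing, and
-- (c) child counts exceeding the children actually present, where A's per-child entry guard
-- silently produces zero-value children consuming nothing (and can spin for up to 2^31 no-op
-- iterations); (b) and (c) are accidents of A's implementation on malformed serializations.
def Pre_read_node (data : List Int) (index : Int) : Prop :=
  (data.length : Int) ≤ index ∨ (chkNode data (data.length + 1) index).isSome = true
instance (data : List Int) (index : Int) : Decidable (Pre_read_node data index) := by
  unfold Pre_read_node; infer_instance

def pvWitness_read_node : List Int × Int := ([1, 3, 0, 2, 10, 11, 1, 1, 2], 0)

def Spec_read_node (data : List Int) (index : Int) (out : Int × Int) : Prop := out = read_node_alt data index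
instance (data : List Int) (index : Int) (out : Int × Int) : Decidable (Spec_read_node data index out) := by unfold Spec_read_node; infer_instance

-- ===== CLAIM (what is proved, stated in full; the proofs are below) =====
def Claim_equal_read_node : Prop := ∀ (data : List Int) (index : Int), Dom_read_node data index → Pre_read_node data index → Spec_read_node data index (read_node data index)

-- ===== LEMMAS AND PROOFS =====

theorem chk_le (data : List Int) :
    ∀ fuel, (∀ (i j : Int), chkNode data fuel i = some j → i + 2 ≤ j) ∧
            (∀ (k : Nat) (i j : Int), chkKidsF (chkNode data fuel) k i = some j → i ≤ j) := by
  intro fuel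
  induction fuel with
  | zero =>
    refine ⟨?_, ?_⟩
    · intro i j h; simp [chkNode] at h
    · intro k i j h
      cases k with
      | zero => simp only [chkKidsF, Option.some.injEq] at h; omega
      | succ k => simp [chkKidsF, chkNode] at h
  | succ fuel ih =>
    have P : ∀ (i j : Int), chkNode data (fuel + 1) i = some j → i + 2 ≤ j := by
      intro i j h
      simp only [chkNode] at h
      split at h
      · split at h
        · rename_i jk hk
          split at h
          · have hle := ih.2 _ _ _ hk
            try simp only [Option.some.injEq] at h
            omega
          · simp at h
        · simp at h
      · simp at h
    refine ⟨P, ?_⟩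
    intro k
    induction k with
    | zero =>
      intro i j h
      simp only [chkKidsF, Option.some.injEq] at h; omega
    | succ k ihk =>
      intro i j h
      simp only [chkKidsF] at h
      cases hn : chkNode data (fuel + 1) i with
      | none => rw [hn] at h; simp at h
      | some j1 =>
        rw [hn] at h
        simp only [Option.bind] at h
        have := P i j1 hn
        have := ihk j1 j h
        omega

theorem rawLoop (data : List Int) :
    ∀ (n a : Nat) (s : Int), a + n ≤ data.length →
      metaRawA data n (a : Int) s = ((a : Int) + n, ((data.drop a).take n).foldl (· + ·) s) := by
  intro n
  induction n with
  | zero => intro a s _; simp [metaRawA]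
  | succ n ih =>
    intro a s h
    have ha : a < data.length := by omega
    have hget : PySem.List.pyGetD data ((a : Nat) : Int) 0 = data[a] := by
      rw [PySem.List.pyGetD_natCast]
      exact List.getD_eq_getElem data 0 ha
    have hcast : ((a : Nat) : Int) + 1 = (((a + 1 : Nat)) : Int) := by push_cast; ring
    calc metaRawA data (n + 1) ((a : Nat) : Int) s
        = metaRawA data n (((a + 1 : Nat)) : Int) (s + data[a]) := by
          simp only [metaRawA, hget, hcast]
      _ = ((((a + 1 : Nat)) : Int) + n, ((data.drop (a + 1)).take n).foldl (· + ·) (s + data[a])) :=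
          ih (a + 1) _ (by omega)
      _ = ((a : Int) + (n + 1), ((data.drop a).take (n + 1)).foldl (· + ·) s) := by
          rw [List.drop_eq_getElem_cons ha, List.take_succ_cons, List.foldl_cons]
          simp only [Prod.mk.injEq, and_true]
          push_cast; ring

theorem refLoop (data : List Int) (cs : List (Int × Int)) :
    ∀ (n a : Nat) (s : Int), a + n ≤ data.length →
      metaRefA data cs n (a : Int) s =
        ((a : Int) + n,
          ((data.drop a).take n).foldl
            (fun s x => if 0 ≤ x - 1 ∧ x - 1 < (cs.length : Int) then s + (PySem.List.pyGetD cs (x - 1) (0, 0)).2 else s) s) := by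
  intro n
  induction n with
  | zero => intro a s _; simp [metaRefA]
  | succ n ih =>
    intro a s h
    have ha : a < data.length := by omega
    have hget : PySem.List.pyGetD data ((a : Nat) : Int) 0 = data[a] := by
      rw [PySem.List.pyGetD_natCast]
      exact List.getD_eq_getElem data 0 ha
    have hcast : ((a : Nat) : Int) + 1 = (((a + 1 : Nat)) : Int) := by push_cast; ring
    calc metaRefA data cs (n + 1) ((a : Nat) : Int) s
        = metaRefA data cs n (((a + 1 : Nat)) : Int)
            (if 0 ≤ data[a] - 1 ∧ data[a] - 1 < (cs.length : Int) then s + (PySem.List.pyGetD cs (data[a] - 1) (0, 0)).2 else s) := by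
          simp only [metaRefA, hget, hcast]
      _ = ((((a + 1 : Nat)) : Int) + n, ((data.drop (a + 1)).take n).foldl
            (fun s x => if 0 ≤ x - 1 ∧ x - 1 < (cs.length : Int) then s + (PySem.List.pyGetD cs (x - 1) (0, 0)).2 else s)
            (if 0 ≤ data[a] - 1 ∧ data[a] - 1 < (cs.length : Int) then s + (PySem.List.pyGetD cs (data[a] - 1) (0, 0)).2 else s)) :=
          ih (a + 1) _ (by omega)
      _ = _ := by
          rw [List.drop_eq_getElem_cons ha, List.take_succ_cons, List.foldl_cons]
          simp only [Prod.mk.injEq, and_true]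
          push_cast; ring

theorem valsB_len (data : List Int) :
    ∀ (fuel k : Nat) (i : Int), (valsB (parseKidsF (parseB data fuel) k i).1).length = k := by
  intro fuel k
  induction k with
  | zero => intro i; simp [parseKidsF, valsB]
  | succ k ih => intro i; simp [parseKidsF, valsB, ih]

theorem main_lemma (data : List Int) :
    ∀ fuel,
      (∀ (i j : Int), chkNode data fuel i = some j →
        readA data fuel i = (j, valueB (parseB data fuel i).1) ∧ (parseB data fuel i).2 = j) ∧
      (∀ (k : Nat) (i j : Int) (acc : List (Int × Int)), chkKidsF (chkNode data fuel) k i = some j →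
        (readKidsF (readA data fuel) k i acc).2 = j ∧ (parseKidsF (parseB data fuel) k i).2 = j ∧
        (readKidsF (readA data fuel) k i acc).1.map Prod.snd = acc.map Prod.snd ++ valsB (parseKidsF (parseB data fuel) k i).1) := by
  intro fuel
  induction fuel with
  | zero =>
    refine ⟨?_, ?_⟩
    · intro i j h; simp [chkNode] at h
    · intro k i j acc h
      cases k with
      | zero =>
        simp only [chkKidsF, Option.some.injEq] at h
        subst h
        simp [readKidsF, parseKidsF, valsB]
      | succ k => simp [chkKidsF, chkNode] at h
  | succ fuel ih =>
    have P : ∀ (i j : Int), chkNode data (fuel + 1) i = some j →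
        readA data (fuel + 1) i = (j, valueB (parseB data (fuel + 1) i).1) ∧
        (parseB data (fuel + 1) i).2 = j := by
      intro i j h
      simp only [chkNode] at h
      split at h
      case _ hcond =>
        obtain ⟨h0, h1⟩ := hcond
        split at h
        case _ jk hk =>
          split at h
          case _ hmle =>
            try simp only [Option.some.injEq] at h
            have hdi : PySem.List.pyGetD data i 0 = data[i.toNat] :=
              PySem.List.pyGetD_eq_getElem data 0 h0 (by omega)
            have hdi1 : PySem.List.pyGetD data (i + 1) 0 = data[(i + 1).toNat] :=
              PySem.List.pyGetD_eq_getElem data 0 (by omega) h1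
            rw [hdi] at hk
            rw [hdi1] at h hmle
            have hjk2 : i + 2 ≤ jk := (chk_le data fuel).2 _ _ _ hk
            have hjk0 : 0 ≤ jk := by omega
            obtain ⟨kA, kB, kmap⟩ := ih.2 (data[i.toNat]).toNat (i + 2) jk [] hk
            simp only [List.map_nil, List.nil_append] at kmap
            set cs := (readKidsF (readA data fuel) (data[i.toNat]).toNat (i + 2) []).1 with hcs
            set ts := (parseKidsF (parseB data fuel) (data[i.toNat]).toNat (i + 2)).1 with hts
            set mN := (data[(i + 1).toNat]).toNat with hmN
            have hlen : cs.length = (data[i.toNat]).toNat := by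
              have hv := valsB_len data fuel (data[i.toNat]).toNat (i + 2)
              calc cs.length = (cs.map Prod.snd).length := by simp
                _ = (valsB ts).length := by rw [kmap]
                _ = _ := hv
            have hgi : PySem.List.pyGet? data i = some data[i.toNat] :=
              PySem.List.pyGet?_eq_some_getElem data h0 (by omega)
            have hgi1 : PySem.List.pyGet? data (i + 1) = some data[(i + 1).toNat] :=
              PySem.List.pyGet?_eq_some_getElem data (by omega) h1
            have hni : ¬ ((data.length : Int) ≤ i) := by omega
            have hmd : (if 0 < data[(i + 1).toNat] then
                  PySem.List.slice data (some jk) (some (jk + data[(i + 1).toNat])) else [])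
                = (data.drop jk.toNat).take mN := by
              split
              case _ hmpos =>
                rw [PySem.List.slice_toNat data hjk0 (by omega)]
                congr 1
                omega
              case _ hmneg =>
                have hz : mN = 0 := by omega
                rw [hz]; simp
            have hmdlen : (((data.drop jk.toNat).take mN) : List Int).length = mN := by
              simp only [List.length_take, List.length_drop]
              omega
            have eqB : parseB data (fuel + 1) i
                = (PTree.mk ts ((data.drop jk.toNat).take mN), jk + (mN : Int)) := by
              simp only [parseB]
              rw [if_neg hni]
              simp only [hgi, hgi1]
              rw [kB, hmd, hmdlen]
            have eqA : readA data (fuel + 1) i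
                = (if 0 < cs.length then metaRefA data cs mN jk 0 else metaRawA data mN jk 0) := by
              simp only [readA]
              rw [if_neg hni]
              simp only [hgi, hgi1]
              rw [kA]
            have hjknn : jk = ((jk.toNat : Nat) : Int) := (Int.toNat_of_nonneg hjk0).symm
            have hbound : jk.toNat + mN ≤ data.length := by omega
            refine ⟨?_, ?_⟩
            · -- readA = (j, valueB (parseB …).1)
              rw [eqA, eqB]
              cases hcN : (data[i.toNat]).toNat with
              | zero =>
                have hts0 : ts = PTreeList.nil := by
                  rw [hts, hcN]; simp [parseKidsF]
                rw [if_neg (by omega)]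
                rw [hjknn, rawLoop data mN jk.toNat 0 hbound]
                rw [hts0]
                simp only [valueB]
                simp only [Prod.mk.injEq, Int.toNat_natCast, and_true]
                omega
              | succ k0 =>
                have htsc : ts = PTreeList.cons (parseB data fuel (i + 2)).1
                    (parseKidsF (parseB data fuel) k0 (parseB data fuel (i + 2)).2).1 := by
                  rw [hts, hcN]; simp [parseKidsF]
                rw [if_pos (by omega)]
                rw [hjknn, refLoop data cs mN jk.toNat 0 hbound]
                rw [htsc]
                simp only [valueB]
                rw [← htsc, ← kmap]
                have hfun : (fun (s x : Int) =>
                      if 1 ≤ x ∧ x ≤ ((cs.map Prod.snd).length : Int)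
                      then s + PySem.List.pyGetD (cs.map Prod.snd) (x - 1) 0 else s)
                    = (fun (s x : Int) =>
                      if 0 ≤ x - 1 ∧ x - 1 < (cs.length : Int)
                      then s + (PySem.List.pyGetD cs (x - 1) (0, 0)).2 else s) := by
                  funext s x
                  rw [← PySem.List.pyGetD_map Prod.snd cs (x - 1) (0, 0)]
                  have hC : (1 ≤ x ∧ x ≤ ((cs.length : Nat) : Int)) ↔
                      (0 ≤ x - 1 ∧ x - 1 < ((cs.length : Nat) : Int)) := by omega
                  simp only [List.length_map, hC]
                rw [hfun]
                simp only [Prod.mk.injEq, Int.toNat_natCast, and_true]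
                omega
            · rw [eqB]
              simp only []
              omega
          case _ => simp at h
        case _ => simp at h
      case _ => simp at h
    refine ⟨P, ?_⟩
    intro k
    induction k with
    | zero =>
      intro i j acc h
      simp only [chkKidsF, Option.some.injEq] at h
      subst h
      simp [readKidsF, parseKidsF, valsB]
    | succ k ihk =>
      intro i j acc h
      simp only [chkKidsF] at h
      cases hn : chkNode data (fuel + 1) i with
      | none => rw [hn] at h; simp at h
      | some j1 =>
        rw [hn] at h
        simp only [Option.bind] at h
        obtain ⟨hA, hB⟩ := P i j1 hn
        have e1 : readKidsF (readA data (fuel + 1)) (k + 1) i acc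
            = readKidsF (readA data (fuel + 1)) k j1 (acc ++ [(j1, valueB (parseB data (fuel + 1) i).1)]) := by
          simp only [readKidsF, hA]
        have e2 : parseKidsF (parseB data (fuel + 1)) (k + 1) i
            = (PTreeList.cons (parseB data (fuel + 1) i).1 (parseKidsF (parseB data (fuel + 1)) k j1).1,
               (parseKidsF (parseB data (fuel + 1)) k j1).2) := by
          simp only [parseKidsF, hB]
        obtain ⟨ih1, ih2, ih3⟩ := ihk j1 j (acc ++ [(j1, valueB (parseB data (fuel + 1) i).1)]) h
        refine ⟨?_, ?_, ?_⟩
        · rw [e1]; exact ih1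
        · rw [e2]; exact ih2
        · rw [e1, e2, ih3]
          simp [valsB]

-- ===== VERDICT (by name: the statement is the Claim_ definition above) =====
theorem read_node_spec : Claim_equal_read_node := by
  intro data index _hDom hPre
  unfold Spec_read_node
  simp only [read_node, read_node_alt]
  rcases hPre with hge | hok
  · simp only [readA, parseB]
    rw [if_pos hge]
    rw [if_pos hge]
    simp [valueB]
  · obtain ⟨j, hj⟩ := Option.isSome_iff_exists.mp hok
    obtain ⟨hA, hB⟩ := (main_lemma data (data.length + 1)).1 index j hj
    rw [hA, hB]
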